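-- pv_equiv track=rewrite | github.com/Dizapoint/computorv1 | findX.py | changeSign
-- ===== SOURCE A (Python) =====
-- def changeSign(read):
--     i = 0
--     result = ''
--     while i < len(read):
--         if i == 0 and read[i] == '-':
--             i += 1
--         elif read[i] == '-':
--             result += '+'
--             i += 1
--         elif read[i] == '+':
--             result += '-'
--             i += 1
--         elif i == 0:
--             result += '-'
--             result += read[i]
--             i += 1
--         else:
--             result += read[i]
--             i += 1
--     return result
-- ===== SOURCE B (Python) =====
-- def changeSign(read):
--     if not read:
--         return ''
--     flipped = read.translate(str.maketrans('+-', '-+'))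
--     if flipped[0] == '+':
--         return flipped[1:]
--     if flipped[0] == '-':
--         return flipped
--     return '-' + flipped
-- ===== Notes on version B (the rewrite author's own statement) =====
-- stated objective: simpler
-- what changed: Replaces A's single index loop with position-0 branches by a whole-string translate that flips every sign in one sweep, followed by a separate fix-up of the first character (drop a leading '+', keep a leading '-', else prepend '-').
import Mathlib
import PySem

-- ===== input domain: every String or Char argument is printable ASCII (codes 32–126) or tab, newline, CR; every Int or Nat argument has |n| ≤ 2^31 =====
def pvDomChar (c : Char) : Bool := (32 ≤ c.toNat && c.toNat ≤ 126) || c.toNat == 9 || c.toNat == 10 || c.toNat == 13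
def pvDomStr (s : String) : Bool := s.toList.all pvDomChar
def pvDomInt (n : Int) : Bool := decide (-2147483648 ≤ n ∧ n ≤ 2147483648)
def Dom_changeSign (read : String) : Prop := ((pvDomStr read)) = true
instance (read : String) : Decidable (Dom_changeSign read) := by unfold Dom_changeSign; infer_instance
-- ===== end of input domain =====

-- B flips every sign in one whole-string sweep (translate) and fixes only the first
-- character afterwards, instead of A's per-index loop with position-0 branches (objective: simpler).

-- ===== PORT A =====
-- A's while loop over index i, accumulating result; recursion on the remaining chars carries i.
def changeSignLoop (cs : List Char) (i : Nat) (result : String) : String :=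
  match cs with
  | [] => result
  | c :: rest =>
    if i = 0 ∧ c = '-' then changeSignLoop rest (i + 1) result
    else if c = '-' then changeSignLoop rest (i + 1) (result ++ String.ofList ['+'])
    else if c = '+' then changeSignLoop rest (i + 1) (result ++ String.ofList ['-'])
    else if i = 0 then changeSignLoop rest (i + 1) (result ++ String.ofList ['-'] ++ String.ofList [c])
    else changeSignLoop rest (i + 1) (result ++ String.ofList [c])

def changeSign (read : String) : String := changeSignLoop read.toList 0 ""

-- ===== PORT B =====
-- the translate table '+-' -> '-+'
def flipChar (c : Char) : Char := if c = '+' then '-' else if c = '-' then '+' else c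

def changeSign_alt (read : String) : String :=
  match read.toList.map flipChar with
  | [] => ""
  | f :: rest =>
    if f = '+' then String.ofList rest
    else if f = '-' then String.ofList (f :: rest)
    else String.ofList ('-' :: f :: rest)

-- ===== PRECONDITION & SPEC =====
def Spec_changeSign (read : String) (out : String) : Prop := out = changeSign_alt read
instance (read : String) (out : String) : Decidable (Spec_changeSign read out) := by unfold Spec_changeSign; infer_instance

-- ===== CLAIM (what is proved, stated in full; the proofs are below) =====
def Claim_equal_changeSign : Prop := ∀ (read : String), Dom_changeSign read → Spec_changeSign read (changeSign read)

-- ===== LEMMAS AND PROOFS =====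
-- For i ≥ 1 the loop never meets its position-0 branches: it just appends the flipped tail.
theorem changeSignLoop_succ (cs : List Char) : ∀ (i : Nat) (acc : String),
    changeSignLoop cs (i + 1) acc = acc ++ String.ofList (cs.map flipChar) := by
  induction cs with
  | nil =>
    intro i acc
    rw [← String.toList_inj]
    simp [changeSignLoop, String.toList_append]
  | cons c rest ih =>
    intro i acc
    by_cases h1 : c = '-'
    · subst h1
      simp only [changeSignLoop, Nat.succ_ne_zero, false_and, if_false, if_pos rfl]
      rw [ih, ← String.toList_inj]
      simp [String.toList_append, flipChar]
    · by_cases h2 : c = '+'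
      · subst h2
        simp only [changeSignLoop, Nat.succ_ne_zero, false_and, if_false,
          if_neg (by decide : ¬ ('+' : Char) = '-'), if_pos rfl]
        rw [ih, ← String.toList_inj]
        simp [String.toList_append, flipChar]
      · have hf : flipChar c = c := by simp [flipChar, h1, h2]
        simp only [changeSignLoop, Nat.succ_ne_zero, false_and, if_false, h1, h2, if_neg h1,
          if_neg h2]
        rw [ih, ← String.toList_inj]
        simp [String.toList_append, hf]

theorem changeSignLoop_one (cs : List Char) (acc : String) :
    changeSignLoop cs 1 acc = acc ++ String.ofList (cs.map flipChar) :=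
  changeSignLoop_succ cs 0 acc

theorem toList_minus : ("-" : String).toList = ['-'] := rfl

-- ===== VERDICT (by name: the statement is the Claim_ definition above) =====
theorem changeSign_spec : Claim_equal_changeSign := by
  intro read _
  unfold Spec_changeSign changeSign changeSign_alt
  cases h : read.toList with
  | nil => simp [changeSignLoop]
  | cons c rest =>
    by_cases h1 : c = '-'
    · subst h1
      simp only [changeSignLoop, if_pos (⟨rfl, rfl⟩ : (0 : Nat) = 0 ∧ ('-' : Char) = '-'),
        List.map, show flipChar '-' = '+' from rfl, if_pos rfl]
      rw [changeSignLoop_succ rest 0, ← String.toList_inj]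
      simp [String.toList_append]
    · by_cases h2 : c = '+'
      · subst h2
        simp only [changeSignLoop, List.map, show flipChar '+' = '-' from rfl]
        rw [← String.toList_inj]
        simp [String.toList_append, toList_minus]
        rw [changeSignLoop_one]
        simp [String.toList_append, toList_minus]
      · have hf : flipChar c = c := by simp [flipChar, h1, h2]
        simp only [changeSignLoop, List.map, hf, h1, h2]
        rw [← String.toList_inj]
        simp [String.toList_append, toList_minus, h1, h2]
        rw [changeSignLoop_one]
        simp [String.toList_append, toList_minus]
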